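-- pv_equiv track=rewrite | github.com/plesiv/hac | hac/util_common.py | choice_normal
-- ===== SOURCE A (Python) =====
-- def choice_normal(a, all_canonic, separator='.'):
--     """Normalizes list a so that among multiple choices that differ only in
--     priority modifier, just the highest priority one is present in the output
--     list. All the members in the output list are in the canonic form
--     <TYPE>.<PRIORITY>.
--
--     List all_canonic contains the all available canonic entries.
--
--     If in there is entry without the priority modifier in the input list, it
--     corresponds to the request for highest priority choice available (one with
--     lowest priority modifier).
--
--     >>> choice_normal(['cpp.0', 'cpp.1', 'py'], ['cpp.0', 'cpp.1', 'py.15'])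
--     ['cpp.0', 'py.15']
--
--     >>> choice_normal(['cpp', 'py.1', 'py'], ['cpp.1', 'py.0', 'py.1'])
--     ['cpp.1', 'py.0']
--
--     DEFINITIONS:
--         - regular entries: 'cpp', 'cpp.0', 'py', 'py.15'
--         - canonic entries: 'cpp.0', 'py.15'
--         - bare entries: 'cpp', 'py'
--     """
--     separator = '.'
--     assert all([separator in ec for ec in all_canonic])
--     c2c = {ec: ec for ec in all_canonic}  # Map canonic to canonic.
--
--     r2c = c2c.copy()                      # Map regular to canonic.
--     for ec in sorted(set(all_canonic)):
--         eb = ec.split(separator)[0]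
--         if eb not in r2c:
--             r2c[eb] = ec
--
--     r2b = {}                              # Map regular to bare.
--     for er in r2c:
--         assert separator in r2c[er]
--         r2b[er] = r2c[er].split(separator)[0]
--
--     b_track = set()
--     ret = []
--     for er in sorted(set(a)):
--         eb = r2b[er]
--         ec = r2c[er]
--         if eb not in b_track:
--             b_track.add(eb)
--             ret.append(ec)
--
--     return ret
-- ===== SOURCE B (Python) =====
-- def choice_normal(a, all_canonic, separator='.'):
--     separator = '.'
--     assert all(separator in ec for ec in all_canonic)
--     best = {}    # bare type -> lexicographically smallest canonic entry
--     for ec in all_canonic: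
--         b = ec.split(separator)[0]
--         if b not in best or ec < best[b]:
--             best[b] = ec
--     winner = {}  # bare type -> lexicographically smallest request with that bare
--     for er in a:
--         b = er.split(separator)[0]
--         if b not in winner or er < winner[b]:
--             winner[b] = er
--     return [er if separator in er else best[er]
--             for er in sorted(winner.values())]
-- ===== Notes on version B (the rewrite author's own statement) =====
-- stated objective: alternative
-- what changed: A sorts the deduplicated request list and walks it with a seen-bares set, resolving each entry through three precomputed maps (canonic-to-canonic, regular-to-canonic, regular-to-bare); B never sorts or dedupes the requests: it groups the requests themselves by bare type with a running-min dict (one winner request per bare), so the seen-set dedupe scan disappears, and emits the resolved winners sorted.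
import Mathlib
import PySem

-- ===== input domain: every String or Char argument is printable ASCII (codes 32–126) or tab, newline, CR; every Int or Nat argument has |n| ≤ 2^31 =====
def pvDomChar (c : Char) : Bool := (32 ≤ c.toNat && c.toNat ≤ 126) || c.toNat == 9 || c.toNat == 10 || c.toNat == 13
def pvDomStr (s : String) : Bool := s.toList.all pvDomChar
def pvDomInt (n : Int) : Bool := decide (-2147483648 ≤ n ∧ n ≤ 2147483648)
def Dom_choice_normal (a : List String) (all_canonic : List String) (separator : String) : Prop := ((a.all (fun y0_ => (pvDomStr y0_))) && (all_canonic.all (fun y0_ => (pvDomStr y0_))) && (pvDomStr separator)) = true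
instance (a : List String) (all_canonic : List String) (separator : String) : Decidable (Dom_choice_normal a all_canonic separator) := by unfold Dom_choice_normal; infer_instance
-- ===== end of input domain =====

-- B never sorts or dedupes the request list: it groups the requests themselves by bare type with a
-- running-min dict (one winner per bare), so A's seen-bares dedupe scan and its three resolution maps
-- disappear; the resolved winners are emitted sorted (objective: alternative).
-- Shared helper: ec.split('.')[0] — the part of the string before the first '.'.
def pyBare (s : String) : String := ((PySem.Str.split? s ".").getD []).headD ""

-- ===== PORT A =====
def choice_normal (a : List String) (all_canonic : List String) (_separator : String) : List String :=
  let separator := "."  -- A rebinds the parameter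
  if all_canonic.all (fun ec => PySem.Str.isIn separator ec) then
    -- c2c = {ec: ec for ec in all_canonic}
    let c2c : PySem.Dict String String :=
      all_canonic.foldl (fun d ec => d.insert ec ec) PySem.Dict.empty
    -- for ec in sorted(set(all_canonic)): if bare not in r2c: r2c[bare] = ec
    let r2c : PySem.Dict String String :=
      (PySem.List.sorted (PySem.Set.ofList all_canonic) (fun x => x) false).foldl
        (fun d ec => if d.contains (pyBare ec) then d else d.insert (pyBare ec) ec) c2c
    -- for er in r2c: r2b[er] = r2c[er].split('.')[0]   (iterating the keys = iterating the items since
    -- keys are unique; the inner 'assert separator in r2c[er]' can only fail when the first assert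
    -- failed — every r2c value is a canonic entry — so it is a no-op on the admitted inputs)
    let r2b : PySem.Dict String String :=
      r2c.items.foldl (fun d p => d.insert p.1 (pyBare p.2)) PySem.Dict.empty
    -- b_track/ret loop over sorted(set(a)); the lookups r2b[er]/r2c[er] (KeyError) are excluded by Pre_
    let fin :=
      (PySem.List.sorted (PySem.Set.ofList a) (fun x => x) false).foldl
        (fun (st : PySem.Set String × List String) er =>
          if st.1.contains (r2b.getD er "") then st
          else (PySem.Set.add st.1 (r2b.getD er ""), st.2 ++ [r2c.getD er ""]))
        (PySem.Set.empty, [])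
    fin.2
  else []  -- AssertionError; excluded by Pre_

-- ===== PORT B =====
def choice_normal_alt (a : List String) (all_canonic : List String) (_separator : String) : List String :=
  let separator := "."
  if all_canonic.all (fun ec => PySem.Str.isIn separator ec) then
    -- best: bare → lexicographically smallest canonic entry, one running-min pass over all_canonic
    let best : PySem.Dict String String :=
      all_canonic.foldl
        (fun d ec => if !d.contains (pyBare ec) || decide (ec < d.getD (pyBare ec) "") then d.insert (pyBare ec) ec else d)
        PySem.Dict.empty
    -- winner: bare → lexicographically smallest request with that bare, one running-min pass over a
    let winner : PySem.Dict String String :=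
      a.foldl
        (fun d er => if !d.contains (pyBare er) || decide (er < d.getD (pyBare er) "") then d.insert (pyBare er) er else d)
        PySem.Dict.empty
    -- [er if '.' in er else best[er] for er in sorted(winner.values())]; KeyError excluded by Pre_
    (PySem.List.sorted winner.values (fun x => x) false).map
      (fun er => if PySem.Str.isIn separator er then er else best.getD er "")
  else []  -- AssertionError; excluded by Pre_

-- ===== PRECONDITION & SPEC =====
-- Pre_ = exactly where the Python A returns: every canonic entry contains '.' (else AssertionError) and
-- every requested entry is a canonic entry or the bare type of one (else KeyError).
def Pre_choice_normal (a : List String) (all_canonic : List String) (separator : String) : Prop :=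
  (∀ ec ∈ all_canonic, PySem.Str.isIn "." ec = true) ∧
  (∀ er ∈ a, er ∈ all_canonic ∨ ∃ ec ∈ all_canonic, pyBare ec = er)
instance (a : List String) (all_canonic : List String) (separator : String) : Decidable (Pre_choice_normal a all_canonic separator) := by unfold Pre_choice_normal; infer_instance

def pvWitness_choice_normal : List String × List String × String :=
  (["cpp", "py.1", "py"], ["cpp.0", "cpp.1", "py.1"], ".")

def Spec_choice_normal (a : List String) (all_canonic : List String) (separator : String) (out : List String) : Prop := out = choice_normal_alt a all_canonic separator
instance (a : List String) (all_canonic : List String) (separator : String) (out : List String) : Decidable (Spec_choice_normal a all_canonic separator out) := by unfold Spec_choice_normal; infer_instance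

-- ===== CLAIM (what is proved, stated in full; the proofs are below) =====
def Claim_equal_choice_normal : Prop := ∀ (a : List String) (all_canonic : List String) (separator : String), Dom_choice_normal a all_canonic separator → Pre_choice_normal a all_canonic separator → Spec_choice_normal a all_canonic separator (choice_normal a all_canonic separator)

-- ===== LEMMAS AND PROOFS =====

-- ---- string facts about pyBare ----

-- headD of an append
theorem pv_headD_append {α : Type} (l1 l2 : List α) (d : α) :
    (l1 ++ l2).headD d = l1.headD (l2.headD d) := by
  cases l1 <;> rfl

-- the first chunk of split-by-'.' is the longest '.'-free prefix (stated through headD so that the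
-- accumulator cases of splitOn.go stay uniform)
theorem pv_go_headD (fuel : Nat) (l cur : List Char) (acc : List (List Char)) (d : List Char)
    (h : l.length < fuel) :
    (PySem.Chars.splitOn.go ['.'] fuel l cur acc).headD d
      = (acc.reverse ++ [cur.reverse ++ l.takeWhile (fun c => !(c == '.'))]).headD d := by
  induction fuel generalizing l cur acc with
  | zero => omega
  | succ fuel ih =>
      cases l with
      | nil => simp [PySem.Chars.splitOn.go]
      | cons c rest =>
          by_cases hc : c = '.'
          · subst hc
            have hpre : List.isPrefixOf ['.'] ('.' :: rest) = true := by
              simp [List.isPrefixOf]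
            rw [show PySem.Chars.splitOn.go ['.'] (fuel + 1) ('.' :: rest) cur acc
                  = PySem.Chars.splitOn.go ['.'] fuel (List.drop (List.length ['.']) ('.' :: rest)) [] (cur.reverse :: acc) by
                simp [PySem.Chars.splitOn.go, hpre]]
            simp only [List.length_singleton, List.drop_succ_cons, List.drop_zero]
            rw [ih rest [] (cur.reverse :: acc) (by simpa using Nat.lt_of_succ_lt_succ h)]
            rw [List.takeWhile_cons]
            simp only [beq_self_eq_true, Bool.not_true, Bool.false_eq_true, if_false,
              List.reverse_cons, List.reverse_nil, List.nil_append, List.append_assoc]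
            rw [pv_headD_append, pv_headD_append, pv_headD_append]
            simp
          · have hpre : List.isPrefixOf ['.'] (c :: rest) = false := by
              have : ('.' == c) = false := beq_eq_false_iff_ne.mpr (fun hh => hc hh.symm)
              simp [List.isPrefixOf, this]
            rw [show PySem.Chars.splitOn.go ['.'] (fuel + 1) (c :: rest) cur acc
                  = PySem.Chars.splitOn.go ['.'] fuel rest (c :: cur) acc by
                simp [PySem.Chars.splitOn.go, hpre]]
            rw [ih rest (c :: cur) acc (by simpa using Nat.lt_of_succ_lt_succ h)]
            rw [List.takeWhile_cons]
            have hcb : (c == '.') = false := beq_eq_false_iff_ne.mpr hc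
            simp [hcb]

theorem pv_pyBare_eq (s : String) :
    pyBare s = String.ofList (s.toList.takeWhile (fun c => !(c == '.'))) := by
  unfold pyBare
  have hsep : (".".toList) = ['.'] := rfl
  rw [PySem.Str.split?]
  rw [hsep]
  rw [PySem.Chars.split?]
  simp only [List.isEmpty_cons, Bool.false_eq_true, if_false, Option.map_some, Option.getD_some]
  rw [PySem.Chars.splitOn]
  have h0 : ("" : String) = String.ofList ([] : List Char) := rfl
  rw [h0, List.headD_map]
  rw [pv_go_headD _ _ _ _ _ (Nat.lt_succ_self _)]
  simp

-- '.' ∈ s ↔ isIn "." s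
theorem pv_isIn_dot (s : String) : PySem.Str.isIn "." s = true ↔ '.' ∈ s.toList := by
  rw [PySem.Str.isIn_iff_infix]
  exact List.singleton_infix_iff '.' s.toList

-- the bare part never contains the separator
theorem pv_not_isIn_pyBare (s : String) : PySem.Str.isIn "." (pyBare s) = false := by
  rw [Bool.eq_false_iff]
  intro h
  rw [pv_pyBare_eq, pv_isIn_dot, String.toList_ofList] at h
  have := List.mem_takeWhile_imp h
  simp at this

-- a string without '.' is its own bare part
theorem pv_pyBare_of_not_isIn (s : String) (h : PySem.Str.isIn "." s = false) : pyBare s = s := by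
  rw [pv_pyBare_eq]
  have hnd : ∀ c ∈ s.toList, (!(c == '.')) = true := by
    intro c hc
    rcases eq_or_ne c '.' with rfl | hne
    · exact absurd ((pv_isIn_dot s).mpr hc) (Bool.eq_false_iff.mp h)
    · simp [hne]
  rw [List.takeWhile_eq_self_iff.mpr hnd, String.ofList_toList]

-- ---- dict-fold facts ----

-- c2c: a fold of self-inserts — lookup returns the key iff it occurs.
theorem pv_c2c_get? (l : List String) (d : PySem.Dict String String) (k : String) :
    (l.foldl (fun d ec => d.insert ec ec) d).get? k = if k ∈ l then some k else d.get? k := by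
  induction l generalizing d with
  | nil => simp
  | cons e t ih =>
      simp only [List.foldl_cons, ih, PySem.Dict.get?_insert, List.mem_cons]
      by_cases h1 : k ∈ t <;> by_cases h2 : k = e <;> simp [h1, h2]

-- A's r2c loop (guarded first-insertion fold): lookup = existing binding, else first element with that bare.
theorem pv_guard_get? (l : List String) (g : String → String) (d : PySem.Dict String String) (k : String) :
    ((l.foldl (fun d ec => if d.contains (g ec) then d else d.insert (g ec) ec) d).get? k)
      = if d.contains k then d.get? k else l.find? (fun ec => g ec == k) := by
  induction l generalizing d with
  | nil =>
      by_cases h : d.contains k = true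
      · simp [h]
      · simp only [Bool.not_eq_true] at h
        simp [h, (PySem.Dict.get?_eq_none_iff_contains d k).2 h]
  | cons e t ih =>
      simp only [List.foldl_cons, List.find?_cons]
      by_cases hc : d.contains (g e) = true
      · rw [if_pos hc, ih]
        by_cases hk : d.contains k = true
        · simp [hk]
        · have hne : (g e == k) = false := by
            refine beq_eq_false_iff_ne.mpr ?_; rintro rfl; exact hk hc
          simp [hk, hne]
      · rw [if_neg hc, ih]
        replace hc : d.contains (g e) = false := by simpa using hc
        by_cases h : k = g e
        · subst h
          simp [hc]
        · have hne : (g e == k) = false := beq_eq_false_iff_ne.mpr (Ne.symm h)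
          simp [PySem.Dict.contains_insert, PySem.Dict.get?_insert, h, hne]

-- reading a literal dict: first matching pair.
theorem pv_get?_mk (L : List (String × String)) (k : String) :
    (PySem.Dict.mk L).get? k = (L.find? (fun p => p.1 == k)).map Prod.snd := by
  induction L with
  | nil => rfl
  | cons p t ih =>
      rw [List.find?_cons]
      cases p with
      | mk k' v =>
          rw [PySem.Dict.get?_mk_cons]
          by_cases h : (k' == k) = true <;> simp [h, ih]

-- a fold of inserts over pairwise-distinct keys read back (A's r2b loop).
theorem pv_mapvals_get? (l : List (String × String)) (f : String → String) (k : String)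
    (hnd : (l.map Prod.fst).Nodup) :
    ((l.foldl (fun d p => d.insert p.1 (f p.2)) PySem.Dict.empty).get? k)
      = (l.find? (fun p => p.1 == k)).map (fun p => f p.2) := by
  have hitems := PySem.Dict.items_foldl_insert_fresh l Prod.fst (fun p => f p.2)
      PySem.Dict.empty (by intro p _; exact PySem.Dict.contains_empty (ν := String) p.1) hnd
  have hD : (l.foldl (fun d p => d.insert p.1 (f p.2)) PySem.Dict.empty)
      = PySem.Dict.mk (l.map fun p => (p.1, f p.2)) := by
    apply PySem.Dict.ext
    simpa using hitems
  rw [hD, pv_get?_mk, List.find?_map]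
  simp [Function.comp_def, Option.map_map]

-- r2c keys stay Nodup through the guarded fold.
theorem pv_guard_nodup (l : List String) (g : String → String) (d : PySem.Dict String String)
    (h : d.keys.Nodup) :
    ((l.foldl (fun d ec => if d.contains (g ec) then d else d.insert (g ec) ec) d)).keys.Nodup := by
  induction l generalizing d with
  | nil => exact h
  | cons e t ih =>
      simp only [List.foldl_cons]
      by_cases hc : d.contains (g e) = true
      · simpa [hc] using ih d h
      · replace hc : d.contains (g e) = false := by simpa using hc
        rw [if_neg (by simp [hc])]
        refine ih _ ?_
        rw [PySem.Dict.keys_insert_of_not_contains _ _ hc]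
        have hkm : g e ∉ d.keys := fun hx =>
          absurd ((PySem.Dict.contains_iff_mem_keys d (g e)).2 hx) (by simp [hc])
        refine List.Nodup.append h (List.nodup_singleton _) ?_
        intro x hx hy
        rw [List.mem_singleton] at hy
        subst hy
        exact hkm hx

-- keys stay Nodup through the running-min fold.
theorem pv_min_nodup (l : List String) (d : PySem.Dict String String) (h : d.keys.Nodup) :
    ((l.foldl (fun d ec => if !d.contains (pyBare ec) || decide (ec < d.getD (pyBare ec) "") then d.insert (pyBare ec) ec else d) d)).keys.Nodup := by
  induction l generalizing d with
  | nil => exact h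
  | cons e t ih =>
      simp only [List.foldl_cons]
      by_cases hc : (!d.contains (pyBare e) || decide (e < d.getD (pyBare e) "")) = true
      · rw [if_pos hc]
        exact ih _ (PySem.Dict.nodup_keys_insert d (pyBare e) e h)
      · rw [if_neg hc]
        exact ih d h

-- value-level running min (the best/winner loops observed at one key).
def pvMinStep (o : Option String) (x : String) : Option String :=
  some (match o with | none => x | some v => if x < v then x else v)

theorem pv_best_get? (l : List String) (d : PySem.Dict String String) (k : String) :
    ((l.foldl (fun d ec => if !d.contains (pyBare ec) || decide (ec < d.getD (pyBare ec) "") then d.insert (pyBare ec) ec else d) d).get? k)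
      = (l.filter (fun ec => pyBare ec == k)).foldl pvMinStep (d.get? k) := by
  induction l generalizing d with
  | nil => rfl
  | cons e t ih =>
      simp only [List.foldl_cons, List.filter_cons]
      rw [ih]
      have hstep : ((if !d.contains (pyBare e) || decide (e < d.getD (pyBare e) "") then d.insert (pyBare e) e else d).get? k)
          = if (pyBare e == k) then pvMinStep (d.get? k) e else d.get? k := by
        by_cases hbk : pyBare e = k
        · subst hbk
          simp only [beq_self_eq_true, if_true]
          cases hv : d.get? (pyBare e) with
          | none =>
              have hc : d.contains (pyBare e) = false :=
                (PySem.Dict.get?_eq_none_iff_contains d (pyBare e)).1 hv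
              simp [hc, pvMinStep]
          | some v =>
              have hc : d.contains (pyBare e) = true := by
                rw [PySem.Dict.contains_eq_isSome_get?, hv]; rfl
              have hgd : d.getD (pyBare e) "" = v := by
                rw [PySem.Dict.getD_eq_get?_getD, hv]; rfl
              by_cases hlt : e < v
              · simp [hc, hgd, hlt, pvMinStep]
              · simp [hc, hgd, hlt, pvMinStep, hv]
        · have hne : (pyBare e == k) = false := beq_eq_false_iff_ne.mpr hbk
          rw [hne]
          simp only [Bool.false_eq_true, if_false]
          by_cases hcond : (!d.contains (pyBare e) || decide (e < d.getD (pyBare e) "")) = true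
          · rw [if_pos hcond, PySem.Dict.get?_insert]
            rw [if_neg (fun hh : k = pyBare e => hbk hh.symm)]
          · rw [if_neg hcond]
      rw [hstep]
      by_cases hb : (pyBare e == k) = true
      · simp [hb]
      · simp only [Bool.not_eq_true] at hb
        simp [hb]

theorem pv_minstep_least (c : List String) (v : String) :
    ∃ m, c.foldl pvMinStep (some v) = some m ∧ m ∈ v :: c ∧ ∀ y ∈ v :: c, m ≤ y := by
  induction c generalizing v with
  | nil => exact ⟨v, rfl, by simp, by simp⟩
  | cons x t ih =>
      obtain ⟨m, hm, hmem, hle⟩ := ih (if x < v then x else v)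
      refine ⟨m, by simpa [pvMinStep] using hm, ?_, ?_⟩
      · rcases List.mem_cons.1 hmem with h | h
        · by_cases hxv : x < v <;> simp_all
        · simp [h]
      · intro y hy
        have hv : m ≤ if x < v then x else v := hle _ (by simp)
        rcases List.mem_cons.1 hy with h | hy'
        · have hvv : (if x < v then x else v) ≤ v := by
            by_cases hxv : x < v
            · rw [if_pos hxv]; exact le_of_lt hxv
            · rw [if_neg hxv]
          exact h ▸ le_trans hv hvv
        rcases List.mem_cons.1 hy' with h | h
        · have hvx : (if x < v then x else v) ≤ x := by
            by_cases hxv : x < v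
            · rw [if_pos hxv]
            · rw [if_neg hxv]; exact le_of_not_gt hxv
          exact h ▸ le_trans hv hvx
        · exact hle _ (by simp [h])

theorem pv_find_sorted_least (S : List String) (p : String → Bool) (m : String)
    (hs : S.Pairwise (· ≤ ·)) (h : S.find? p = some m) :
    m ∈ S ∧ p m = true ∧ ∀ y ∈ S, p y = true → m ≤ y := by
  induction S with
  | nil => simp at h
  | cons e t ih =>
      by_cases hp : p e = true
      · rw [List.find?_cons_of_pos hp] at h
        obtain rfl : e = m := by simpa using h
        refine ⟨by simp, hp, ?_⟩
        intro y hy _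
        rcases List.mem_cons.1 hy with h | h
        · simp [h]
        · exact (List.pairwise_cons.1 hs).1 y h
      · replace hp : p e = false := by simpa using hp
        rw [List.find?_cons_of_neg (by simp [hp])] at h
        obtain ⟨h1, h2, h3⟩ := ih (List.pairwise_cons.1 hs).2 h
        refine ⟨by simp [h1], h2, ?_⟩
        intro y hy hpy
        rcases List.mem_cons.1 hy with h | h
        · subst h; simp [hp] at hpy
        · exact h3 y h hpy

-- the central fact: A's r2c lookup = resolution through the running-min best dict.
theorem pv_resolve (ac : List String) (er : String)
    (her : er ∈ ac ∨ ∃ ec ∈ ac, pyBare ec = er) :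
    (((PySem.List.sorted (PySem.Set.ofList ac) (fun x => x) false).foldl
        (fun d ec => if d.contains (pyBare ec) then d else d.insert (pyBare ec) ec)
        (ac.foldl (fun d ec => d.insert ec ec) PySem.Dict.empty)).get? er)
      = some (if (PySem.Set.ofList ac).contains er then er
              else (ac.foldl
                (fun d ec => if !d.contains (pyBare ec) || decide (ec < d.getD (pyBare ec) "") then d.insert (pyBare ec) ec else d)
                PySem.Dict.empty).getD er "") := by
  rw [pv_guard_get?]
  have hc2c := pv_c2c_get? ac PySem.Dict.empty er
  by_cases hmem : er ∈ ac
  · have hget : (ac.foldl (fun d ec => d.insert ec ec) PySem.Dict.empty).get? er = some er := by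
      rw [hc2c, if_pos hmem]
    have hcont : (ac.foldl (fun d ec => d.insert ec ec) PySem.Dict.empty).contains er = true := by
      rw [PySem.Dict.contains_eq_isSome_get?, hget]; rfl
    have hsc : (PySem.Set.ofList ac).contains er = true := by
      unfold PySem.Set.contains
      exact List.contains_iff_mem.mpr ((PySem.Set.mem_ofList ac er).mpr hmem)
    rw [if_pos hcont, hget, if_pos hsc]
  · obtain ⟨ec₀, hec₀, hbare₀⟩ := her.resolve_left (fun h => hmem h)
    have hget : (ac.foldl (fun d ec => d.insert ec ec) PySem.Dict.empty).get? er = none := by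
      rw [hc2c, if_neg hmem]; rfl
    have hcont : (ac.foldl (fun d ec => d.insert ec ec) PySem.Dict.empty).contains er = false :=
      (PySem.Dict.get?_eq_none_iff_contains _ er).1 hget
    have hsc : (PySem.Set.ofList ac).contains er = false := by
      unfold PySem.Set.contains
      rw [Bool.eq_false_iff]
      intro hcontra
      exact hmem ((PySem.Set.mem_ofList ac er).1 (List.contains_iff_mem.1 hcontra))
    have hcontn : ¬((ac.foldl (fun d ec => d.insert ec ec) PySem.Dict.empty).contains er = true) := by
      rw [hcont]; simp
    have hscn : ¬((PySem.Set.ofList ac).contains er = true) := by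
      rw [hsc]; simp
    rw [if_neg hcontn, if_neg hscn]
    -- B side: the best-dict lookup is the running min over the candidates
    rw [PySem.Dict.getD_eq_get?_getD, pv_best_get?, PySem.Dict.get?_empty]
    have hcand : ec₀ ∈ ac.filter (fun ec => pyBare ec == er) := by
      simp [List.mem_filter, hec₀, hbare₀]
    cases hfil : ac.filter (fun ec => pyBare ec == er) with
    | nil => rw [hfil] at hcand; simp at hcand
    | cons x c =>
        have hfold : (x :: c).foldl pvMinStep none = c.foldl pvMinStep (some x) := by
          simp [pvMinStep]
        obtain ⟨mB, hmB, hmBmem, hmBle⟩ := pv_minstep_least c x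
        -- A side: find? on the sorted distinct canonic list succeeds
        have hS : ec₀ ∈ PySem.List.sorted (PySem.Set.ofList ac) (fun x => x) false := by
          rw [PySem.List.mem_sorted, PySem.Set.mem_ofList]; exact hec₀
        cases hfind : (PySem.List.sorted (PySem.Set.ofList ac) (fun x => x) false).find?
            (fun ec => pyBare ec == er) with
        | none =>
            exact absurd (List.find?_eq_none.1 hfind ec₀ hS) (by simp [hbare₀])
        | some mA =>
            obtain ⟨hmAS, hmAp, hmAle⟩ := pv_find_sorted_least _ _ mA
              (PySem.List.sorted_pairwise (PySem.Set.ofList ac) (fun x => x)) hfind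
            rw [hfold, hmB]
            have hAB : mA = mB := by
              apply le_antisymm
              · have hmBc : mB ∈ ac.filter (fun ec => pyBare ec == er) := by rw [hfil]; exact hmBmem
                have := List.mem_filter.1 hmBc
                exact hmAle mB (by rw [PySem.List.mem_sorted, PySem.Set.mem_ofList]; exact this.1) this.2
              · have hmAac : mA ∈ ac := by
                  rw [PySem.List.mem_sorted, PySem.Set.mem_ofList] at hmAS; exact hmAS
                have hmAc : mA ∈ ac.filter (fun ec => pyBare ec == er) :=
                  List.mem_filter.2 ⟨hmAac, hmAp⟩
                rw [hfil] at hmAc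
                exact hmBle mA hmAc
            simp [hAB]

-- A's r2b lookup = bare of A's r2c lookup.
theorem pv_r2b_get? (d : PySem.Dict String String) (hnd : d.keys.Nodup) (k : String) :
    ((d.items.foldl (fun d' p => d'.insert p.1 (pyBare p.2)) PySem.Dict.empty).get? k)
      = (d.get? k).map pyBare := by
  have hnd' : (d.items.map Prod.fst).Nodup := hnd
  rw [pv_mapvals_get? _ _ _ hnd']
  have : d.get? k = (d.items.find? (fun p => p.1 == k)).map Prod.snd := pv_get?_mk d.items k
  rw [this, Option.map_map]
  rfl

-- ---- A's dedupe loop = filtering the per-bare minima ----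

-- the survivors of a first-per-bare scan
def pvSurv : List String → PySem.Set String → List String
  | [], _ => []
  | x :: t, s => if PySem.Set.contains s (pyBare x) then pvSurv t s
                 else x :: pvSurv t (PySem.Set.add s (pyBare x))

-- on a strictly sorted list the survivors are exactly the minima of their bare class
theorem pv_surv_filter (S : List String) (seen : PySem.Set String)
    (hs : S.Pairwise (· < ·)) :
    pvSurv S seen
      = S.filter (fun x => !(PySem.Set.contains seen (pyBare x))
                            && decide (∀ y ∈ S, pyBare y = pyBare x → x ≤ y)) := by
  induction S generalizing seen with
  | nil => simp [pvSurv]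
  | cons x t ih =>
      obtain ⟨hxt, ht⟩ := List.pairwise_cons.1 hs
      simp only [pvSurv, List.filter_cons]
      by_cases hcx : pyBare x ∈ seen
      · have hc : PySem.Set.contains seen (pyBare x) = true := (PySem.Set.contains_iff _ _).mpr hcx
        rw [if_pos hc, hc]
        simp only [Bool.not_true, Bool.false_and, Bool.false_eq_true, if_false]
        rw [ih seen ht]
        apply List.filter_congr
        intro z hz
        by_cases hz2 : pyBare z ∈ seen
        · have hc2 : PySem.Set.contains seen (pyBare z) = true := (PySem.Set.contains_iff _ _).mpr hz2
          rw [hc2]; simp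
        · have hc2 : PySem.Set.contains seen (pyBare z) = false := by
            rw [Bool.eq_false_iff]; exact fun hcc => hz2 ((PySem.Set.contains_iff _ _).1 hcc)
          have hne : pyBare z ≠ pyBare x := fun hh => hz2 (hh ▸ hcx)
          rw [hc2]
          simp only [Bool.not_false, Bool.true_and]
          apply decide_eq_decide.mpr
          constructor
          · intro h y hy hby
            rcases List.mem_cons.1 hy with rfl | hy'
            · exact absurd hby.symm hne
            · exact h y hy' hby
          · intro h y hy hby
            exact h y (List.mem_cons_of_mem _ hy) hby
      · have hc : PySem.Set.contains seen (pyBare x) = false := by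
          rw [Bool.eq_false_iff]; exact fun hcc => hcx ((PySem.Set.contains_iff _ _).1 hcc)
        have hminx : ∀ y ∈ x :: t, pyBare y = pyBare x → x ≤ y := by
          intro y hy _
          rcases List.mem_cons.1 hy with rfl | hy'
          · exact le_rfl
          · exact le_of_lt (hxt y hy')
        rw [if_neg (by rw [hc]; exact Bool.false_ne_true)]
        rw [if_pos (by rw [hc]; simpa using hminx)]
        rw [ih _ ht]
        congr 1
        apply List.filter_congr
        intro z hz
        by_cases hbzx : pyBare z = pyBare x
        · have hmemadd : pyBare z ∈ PySem.Set.add seen (pyBare x) :=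
            (PySem.Set.mem_add _ _ _).2 (Or.inr hbzx)
          have hca : PySem.Set.contains (PySem.Set.add seen (pyBare x)) (pyBare z) = true :=
            (PySem.Set.contains_iff _ _).mpr hmemadd
          have hxz : x < z := hxt z hz
          have hnot : (decide (∀ y ∈ x :: t, pyBare y = pyBare z → z ≤ y)) = false := by
            apply decide_eq_false
            intro h
            exact absurd (h x (by simp) hbzx.symm) (not_le.mpr hxz)
          rw [hca, hnot]
          simp
        · have hca : PySem.Set.contains (PySem.Set.add seen (pyBare x)) (pyBare z)
              = PySem.Set.contains seen (pyBare z) := by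
            by_cases hz2 : pyBare z ∈ seen
            · rw [(PySem.Set.contains_iff _ _).mpr hz2,
                (PySem.Set.contains_iff _ _).mpr ((PySem.Set.mem_add _ _ _).2 (Or.inl hz2))]
            · have h1 : PySem.Set.contains seen (pyBare z) = false := by
                rw [Bool.eq_false_iff]; exact fun hcc => hz2 ((PySem.Set.contains_iff _ _).1 hcc)
              have h2 : PySem.Set.contains (PySem.Set.add seen (pyBare x)) (pyBare z) = false := by
                rw [Bool.eq_false_iff]
                intro hcc
                rcases (PySem.Set.mem_add _ _ _).1 ((PySem.Set.contains_iff _ _).1 hcc) with hh | hh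
                · exact hz2 hh
                · exact hbzx hh
              rw [h1, h2]
          rw [hca]
          congr 1
          apply decide_eq_decide.mpr
          constructor
          · intro h y hy hby
            rcases List.mem_cons.1 hy with rfl | hy'
            · exact absurd hby (fun hh => hbzx hh.symm)
            · exact h y hy' hby
          · intro h y hy hby
            exact h y (List.mem_cons_of_mem _ hy) hby

-- ---- characterization of winner.values ----

-- x is the smallest request of its bare class
def pvIsMin (a : List String) (x : String) : Prop :=
  x ∈ a ∧ ∀ y ∈ a, pyBare y = pyBare x → x ≤ y

theorem pv_winner_get? (a : List String) (k : String) :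
    ((a.foldl (fun d er => if !d.contains (pyBare er) || decide (er < d.getD (pyBare er) "") then d.insert (pyBare er) er else d) PySem.Dict.empty).get? k)
      = (a.filter (fun er => pyBare er == k)).foldl pvMinStep none := by
  rw [pv_best_get?, PySem.Dict.get?_empty]

-- the winner at key k, when the class is nonempty: it is a member of the class and minimal in it
theorem pv_winner_some (a : List String) (k x : String)
    (h : ((a.foldl (fun d er => if !d.contains (pyBare er) || decide (er < d.getD (pyBare er) "") then d.insert (pyBare er) er else d) PySem.Dict.empty).get? k) = some x) :
    x ∈ a ∧ pyBare x = k ∧ ∀ y ∈ a, pyBare y = k → x ≤ y := by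
  rw [pv_winner_get?] at h
  cases hfil : a.filter (fun er => pyBare er == k) with
  | nil => rw [hfil] at h; simp at h
  | cons v c =>
      rw [hfil] at h
      have hfold : (v :: c).foldl pvMinStep none = c.foldl pvMinStep (some v) := by
        simp [pvMinStep]
      rw [hfold] at h
      obtain ⟨m, hm, hmem, hle⟩ := pv_minstep_least c v
      rw [hm] at h
      have hmx : m = x := by simpa using h
      subst hmx
      have hsub : ∀ z ∈ v :: c, z ∈ a ∧ pyBare z = k := by
        intro z hz
        have : z ∈ a.filter (fun er => pyBare er == k) := by rw [hfil]; exact hz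
        have := List.mem_filter.1 this
        exact ⟨this.1, by simpa using this.2⟩
      refine ⟨(hsub m hmem).1, (hsub m hmem).2, ?_⟩
      intro y hy hby
      have hyf : y ∈ v :: c := by
        rw [← hfil]; exact List.mem_filter.2 ⟨hy, by simpa using hby⟩
      exact hle y hyf

-- a nonempty bare class has a winner
theorem pv_min_get?_some (l : List String) (k : String)
    (h : ∃ ec ∈ l, pyBare ec = k) :
    ∃ m, ((l.foldl (fun d er => if !d.contains (pyBare er) || decide (er < d.getD (pyBare er) "") then d.insert (pyBare er) er else d) PySem.Dict.empty).get? k) = some m := by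
  rw [pv_winner_get?]
  obtain ⟨ec, hec, hb⟩ := h
  have hcl : ec ∈ l.filter (fun er => pyBare er == k) :=
    List.mem_filter.2 ⟨hec, by simpa using hb⟩
  cases hfil : l.filter (fun er => pyBare er == k) with
  | nil => rw [hfil] at hcl; simp at hcl
  | cons v c =>
      have hfold : (v :: c).foldl pvMinStep none = c.foldl pvMinStep (some v) := by
        simp [pvMinStep]
      obtain ⟨m, hm, _, _⟩ := pv_minstep_least c v
      exact ⟨m, by rw [hfold, hm]⟩

theorem pv_mem_values_iff (a : List String) (x : String) :
    x ∈ (a.foldl (fun d er => if !d.contains (pyBare er) || decide (er < d.getD (pyBare er) "") then d.insert (pyBare er) er else d) PySem.Dict.empty).values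
      ↔ pvIsMin a x := by
  have hnd : (a.foldl (fun d er => if !d.contains (pyBare er) || decide (er < d.getD (pyBare er) "") then d.insert (pyBare er) er else d) PySem.Dict.empty).keys.Nodup :=
    pv_min_nodup a PySem.Dict.empty PySem.Dict.nodup_keys_empty
  rw [PySem.Dict.values_eq_map_keys _ hnd ""]
  constructor
  · intro hx
    obtain ⟨k, hk, hkx⟩ := List.mem_map.1 hx
    have hcont := (PySem.Dict.contains_iff_mem_keys _ k).2 hk
    cases hget : (a.foldl (fun d er => if !d.contains (pyBare er) || decide (er < d.getD (pyBare er) "") then d.insert (pyBare er) er else d) PySem.Dict.empty).get? k with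
    | none =>
        rw [PySem.Dict.get?_eq_none_iff_contains] at hget
        rw [hget] at hcont; exact absurd hcont (by simp)
    | some v =>
        have hv : (a.foldl (fun d er => if !d.contains (pyBare er) || decide (er < d.getD (pyBare er) "") then d.insert (pyBare er) er else d) PySem.Dict.empty).getD k "" = v := by
          rw [PySem.Dict.getD_eq_get?_getD, hget]; rfl
        rw [hv] at hkx
        subst hkx
        obtain ⟨h1, h2, h3⟩ := pv_winner_some a k v hget
        exact ⟨h1, fun y hy hby => h3 y hy (hby.trans h2)⟩
  · rintro ⟨hxa, hxmin⟩
    obtain ⟨m, hm⟩ := pv_min_get?_some a (pyBare x) ⟨x, hxa, rfl⟩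
    obtain ⟨h1, h2, h3⟩ := pv_winner_some a (pyBare x) m hm
    have hxm : x = m := le_antisymm (hxmin m h1 h2) (h3 x hxa rfl)
    have hk : pyBare x ∈ (a.foldl (fun d er => if !d.contains (pyBare er) || decide (er < d.getD (pyBare er) "") then d.insert (pyBare er) er else d) PySem.Dict.empty).keys := by
      refine (PySem.Dict.contains_iff_mem_keys _ (pyBare x)).1 ?_
      rw [PySem.Dict.contains_eq_isSome_get?, hm]; rfl
    refine List.mem_map.2 ⟨pyBare x, hk, ?_⟩
    rw [PySem.Dict.getD_eq_get?_getD, hm, Option.getD_some, ← hxm]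

theorem pv_values_nodup (a : List String) :
    ((a.foldl (fun d er => if !d.contains (pyBare er) || decide (er < d.getD (pyBare er) "") then d.insert (pyBare er) er else d) PySem.Dict.empty).values).Nodup := by
  have hnd : (a.foldl (fun d er => if !d.contains (pyBare er) || decide (er < d.getD (pyBare er) "") then d.insert (pyBare er) er else d) PySem.Dict.empty).keys.Nodup :=
    pv_min_nodup a PySem.Dict.empty PySem.Dict.nodup_keys_empty
  rw [PySem.Dict.values_eq_map_keys _ hnd ""]
  refine List.Nodup.map_on ?_ hnd
  intro k hk k' hk' heq
  have hbare : ∀ j ∈ (a.foldl (fun d er => if !d.contains (pyBare er) || decide (er < d.getD (pyBare er) "") then d.insert (pyBare er) er else d) PySem.Dict.empty).keys,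
      pyBare ((a.foldl (fun d er => if !d.contains (pyBare er) || decide (er < d.getD (pyBare er) "") then d.insert (pyBare er) er else d) PySem.Dict.empty).getD j "") = j := by
    intro j hj
    have hcont := (PySem.Dict.contains_iff_mem_keys _ j).2 hj
    cases hget : (a.foldl (fun d er => if !d.contains (pyBare er) || decide (er < d.getD (pyBare er) "") then d.insert (pyBare er) er else d) PySem.Dict.empty).get? j with
    | none =>
        rw [PySem.Dict.get?_eq_none_iff_contains] at hget
        rw [hget] at hcont; exact absurd hcont (by simp)
    | some v =>
        obtain ⟨_, h2, _⟩ := pv_winner_some a j v hget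
        rw [PySem.Dict.getD_eq_get?_getD, hget]
        exact h2
  rw [← hbare k hk, ← hbare k' hk', heq]


-- A's dedupe loop, with its lookups abstracted: any loop whose per-element key/value agree with
-- pyBare/f on the traversed list is the survivor scan
theorem pv_dedupe_fold' (keyf valf f : String → String) (S : List String)
    (seen : PySem.Set String) (acc : List String)
    (hk : ∀ er ∈ S, keyf er = pyBare er) (hv : ∀ er ∈ S, valf er = f er) :
    (S.foldl
      (fun (st : PySem.Set String × List String) er =>
        if st.1.contains (keyf er) then st
        else (PySem.Set.add st.1 (keyf er), st.2 ++ [valf er]))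
      (seen, acc)).2 = acc ++ (pvSurv S seen).map f := by
  induction S generalizing seen acc with
  | nil => simp [pvSurv]
  | cons x t ih =>
      have hkx : keyf x = pyBare x := hk x (by simp)
      have hvx : valf x = f x := hv x (by simp)
      have hk' : ∀ er ∈ t, keyf er = pyBare er := fun er h => hk er (List.mem_cons_of_mem _ h)
      have hv' : ∀ er ∈ t, valf er = f er := fun er h => hv er (List.mem_cons_of_mem _ h)
      simp only [List.foldl_cons, pvSurv, hkx, hvx]
      by_cases hc : PySem.Set.contains seen (pyBare x) = true
      · simp only [hc, if_true]
        rw [ih seen acc hk' hv']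
      · replace hc : PySem.Set.contains seen (pyBare x) = false := by simpa using hc
        simp only [hc, Bool.false_eq_true, if_false]
        rw [ih _ _ hk' hv']
        simp

-- ===== VERDICT (by name: the statement is the Claim_ definition above) =====
theorem choice_normal_spec : Claim_equal_choice_normal := by
  intro a ac sep _hdom hpre
  obtain ⟨h1, h2⟩ := hpre
  have hall : ac.all (fun ec => PySem.Str.isIn "." ec) = true := by
    rw [List.all_eq_true]; exact h1
  unfold Spec_choice_normal choice_normal choice_normal_alt
  simp only [hall, if_true]
  have hndc2c : (ac.foldl (fun d ec => d.insert ec ec) PySem.Dict.empty).keys.Nodup :=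
    PySem.Dict.nodup_keys_foldl_insert ac (fun _ ec => ec) PySem.Dict.empty PySem.Dict.nodup_keys_empty
  have hndr2c : ((PySem.List.sorted (PySem.Set.ofList ac) (fun x => x) false).foldl
      (fun d ec => if d.contains (pyBare ec) then d else d.insert (pyBare ec) ec)
      (ac.foldl (fun d ec => d.insert ec ec) PySem.Dict.empty)).keys.Nodup :=
    pv_guard_nodup _ pyBare _ hndc2c
  -- pointwise facts about A's lookups, for every entry of the traversed sorted(set(a))
  have hkey : ∀ er ∈ PySem.List.sorted (PySem.Set.ofList a) (fun x => x) false,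
      ((((PySem.List.sorted (PySem.Set.ofList ac) (fun x => x) false).foldl
          (fun d ec => if d.contains (pyBare ec) then d else d.insert (pyBare ec) ec)
          (ac.foldl (fun d ec => d.insert ec ec) PySem.Dict.empty)).items.foldl
            (fun d p => d.insert p.1 (pyBare p.2)) PySem.Dict.empty).getD er "" = pyBare er)
      ∧ ((((PySem.List.sorted (PySem.Set.ofList ac) (fun x => x) false).foldl
          (fun d ec => if d.contains (pyBare ec) then d else d.insert (pyBare ec) ec)
          (ac.foldl (fun d ec => d.insert ec ec) PySem.Dict.empty)).getD er "")
        = (if PySem.Str.isIn "." er then er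
           else (ac.foldl
             (fun d ec => if !d.contains (pyBare ec) || decide (ec < d.getD (pyBare ec) "") then d.insert (pyBare ec) ec else d)
             PySem.Dict.empty).getD er "")) := by
    intro er hmemL
    have hera : er ∈ a := by
      rw [PySem.List.mem_sorted, PySem.Set.mem_ofList] at hmemL; exact hmemL
    have her := h2 er hera
    have hres := pv_resolve ac er her
    have hvB : (if (PySem.Set.ofList ac).contains er then er
                else (ac.foldl
                  (fun d ec => if !d.contains (pyBare ec) || decide (ec < d.getD (pyBare ec) "") then d.insert (pyBare ec) ec else d)
                  PySem.Dict.empty).getD er "")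
        = (if PySem.Str.isIn "." er then er
           else (ac.foldl
             (fun d ec => if !d.contains (pyBare ec) || decide (ec < d.getD (pyBare ec) "") then d.insert (pyBare ec) ec else d)
             PySem.Dict.empty).getD er "") := by
      by_cases hmem : er ∈ ac
      · have hc : (PySem.Set.ofList ac).contains er = true :=
          (PySem.Set.contains_iff _ _).mpr ((PySem.Set.mem_ofList ac er).mpr hmem)
        rw [hc, h1 er hmem]
      · have hc : (PySem.Set.ofList ac).contains er = false := by
          rw [Bool.eq_false_iff]
          intro hcc
          exact hmem ((PySem.Set.mem_ofList ac er).1 ((PySem.Set.contains_iff _ _).1 hcc))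
        obtain ⟨ec, hec, hb⟩ := her.resolve_left hmem
        have hno : PySem.Str.isIn "." er = false := hb ▸ pv_not_isIn_pyBare ec
        rw [hc, hno]
    have hbareB : pyBare (if (PySem.Set.ofList ac).contains er then er
                else (ac.foldl
                  (fun d ec => if !d.contains (pyBare ec) || decide (ec < d.getD (pyBare ec) "") then d.insert (pyBare ec) ec else d)
                  PySem.Dict.empty).getD er "") = pyBare er := by
      by_cases hmem : er ∈ ac
      · have hc : (PySem.Set.ofList ac).contains er = true :=
          (PySem.Set.contains_iff _ _).mpr ((PySem.Set.mem_ofList ac er).mpr hmem)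
        rw [hc]
        simp
      · have hc : (PySem.Set.ofList ac).contains er = false := by
          rw [Bool.eq_false_iff]
          intro hcc
          exact hmem ((PySem.Set.mem_ofList ac er).1 ((PySem.Set.contains_iff _ _).1 hcc))
        obtain ⟨ec, hec, hb⟩ := her.resolve_left hmem
        obtain ⟨m, hm⟩ := pv_min_get?_some ac er ⟨ec, hec, hb⟩
        obtain ⟨_, hmb, _⟩ := pv_winner_some ac er m hm
        have hno : PySem.Str.isIn "." er = false := hb ▸ pv_not_isIn_pyBare ec
        rw [hc]
        simp only [Bool.false_eq_true, if_false]
        rw [PySem.Dict.getD_eq_get?_getD, hm, Option.getD_some, hmb,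
          pv_pyBare_of_not_isIn er hno]
    refine ⟨?_, ?_⟩
    · rw [PySem.Dict.getD_eq_get?_getD, pv_r2b_get? _ hndr2c er, hres]
      simp only [Option.map_some, Option.getD_some]
      exact hbareB
    · rw [PySem.Dict.getD_eq_get?_getD, hres, Option.getD_some, hvB]
  -- A's loop is the survivor scan applied to B's resolver
  rw [pv_dedupe_fold' _ _
      (fun er => if PySem.Str.isIn "." er then er
                 else (ac.foldl
                   (fun d ec => if !d.contains (pyBare ec) || decide (ec < d.getD (pyBare ec) "") then d.insert (pyBare ec) ec else d)
                   PySem.Dict.empty).getD er "")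
      (PySem.List.sorted (PySem.Set.ofList a) (fun x => x) false) PySem.Set.empty []
      (fun er h => (hkey er h).1) (fun er h => (hkey er h).2)]
  rw [pv_surv_filter _ _ (PySem.List.sorted_ofList_pairwise_lt a)]
  -- drop the empty seen-set and widen the quantifier from the sorted list to a
  have hfilter :
      ((PySem.List.sorted (PySem.Set.ofList a) (fun x => x) false).filter
        (fun x => !(PySem.Set.contains PySem.Set.empty (pyBare x))
                   && decide (∀ y ∈ PySem.List.sorted (PySem.Set.ofList a) (fun x => x) false, pyBare y = pyBare x → x ≤ y)))
      = ((PySem.List.sorted (PySem.Set.ofList a) (fun x => x) false).filter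
        (fun x => decide (∀ y ∈ a, pyBare y = pyBare x → x ≤ y))) := by
    apply List.filter_congr
    intro z hz
    have hempty : PySem.Set.contains PySem.Set.empty (pyBare z) = false := rfl
    rw [hempty]
    simp only [Bool.not_false, Bool.true_and]
    apply decide_eq_decide.mpr
    constructor
    · intro h y hy hby
      exact h y ((PySem.List.mem_sorted _ _ _ _).mpr ((PySem.Set.mem_ofList a y).mpr hy)) hby
    · intro h y hy hby
      exact h y ((PySem.Set.mem_ofList a y).1 ((PySem.List.mem_sorted _ _ _ _).1 hy)) hby
  rw [hfilter]
  -- B side: sorted(winner.values()) is exactly that filtered list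
  have hM :
      PySem.List.sorted
        ((a.foldl (fun d er => if !d.contains (pyBare er) || decide (er < d.getD (pyBare er) "") then d.insert (pyBare er) er else d) PySem.Dict.empty).values)
        (fun x => x) false
      = ((PySem.List.sorted (PySem.Set.ofList a) (fun x => x) false).filter
          (fun x => decide (∀ y ∈ a, pyBare y = pyBare x → x ≤ y))) := by
    have hMlt : ((PySem.List.sorted (PySem.Set.ofList a) (fun x => x) false).filter
          (fun x => decide (∀ y ∈ a, pyBare y = pyBare x → x ≤ y))).Pairwise (· < ·) :=
      List.Pairwise.filter _ (PySem.List.sorted_ofList_pairwise_lt a)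
    have hMnd : ((PySem.List.sorted (PySem.Set.ofList a) (fun x => x) false).filter
          (fun x => decide (∀ y ∈ a, pyBare y = pyBare x → x ≤ y))).Nodup :=
      hMlt.imp (fun h => ne_of_lt h)
    have hVnd := pv_values_nodup a
    have hperm : ((PySem.List.sorted (PySem.Set.ofList a) (fun x => x) false).filter
          (fun x => decide (∀ y ∈ a, pyBare y = pyBare x → x ≤ y))).Perm
        ((a.foldl (fun d er => if !d.contains (pyBare er) || decide (er < d.getD (pyBare er) "") then d.insert (pyBare er) er else d) PySem.Dict.empty).values) := by
      rw [List.perm_ext_iff_of_nodup hMnd hVnd]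
      intro x
      rw [List.mem_filter, pv_mem_values_iff, PySem.List.mem_sorted, PySem.Set.mem_ofList]
      unfold pvIsMin
      simp
    exact PySem.List.sorted_eq_of_perm_of_pairwise_lt _ _ _ hperm hMlt
  rw [hM]
  simp
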